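-- pv_equiv track=rewrite | github.com/BimalRajGyawali/gh-pr-analysis | scripts/plot_pr_flow_graphs.py | roots_and_adjacency
-- ===== SOURCE A (Python) =====
-- def roots_and_adjacency(
--     nodes: set[str], directed: set[tuple[str, str]]
-- ) -> tuple[list[str], dict[str, set[str]]]:
--     out_adj: dict[str, set[str]] = {n: set() for n in nodes}
--     in_deg: dict[str, int] = {n: 0 for n in nodes}
--     for a, b in directed:
--         if a not in out_adj or b not in out_adj:
--             continue
--         out_adj[a].add(b)
--         in_deg[b] += 1
--     roots = sorted([n for n in nodes if in_deg[n] == 0])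
--     return roots, out_adj
-- ===== SOURCE B (Python) =====
-- def roots_and_adjacency(
--     nodes: set[str], directed: set[tuple[str, str]]
-- ) -> tuple[list[str], dict[str, set[str]]]:
--     ns = set(nodes)
--     edges = [(a, b) for a, b in directed if a in ns and b in ns]
--     out_adj = {n: {b for a, b in edges if a == n} for n in nodes}
--     targets = {b for a, b in edges}
--     roots = sorted(ns - targets)
--     return roots, out_adj
-- ===== Notes on version B (the rewrite author's own statement) =====
-- stated objective: simpler
-- what changed: B replaces A's incrementally-mutated out_adj/in_deg dicts with staged comprehensions: it first filters the valid edges once, then builds each node's successor set by a per-node comprehension over that edge list, and derives roots as nodes minus the set of edge targets instead of maintaining an in-degree counter.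
import Mathlib
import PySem

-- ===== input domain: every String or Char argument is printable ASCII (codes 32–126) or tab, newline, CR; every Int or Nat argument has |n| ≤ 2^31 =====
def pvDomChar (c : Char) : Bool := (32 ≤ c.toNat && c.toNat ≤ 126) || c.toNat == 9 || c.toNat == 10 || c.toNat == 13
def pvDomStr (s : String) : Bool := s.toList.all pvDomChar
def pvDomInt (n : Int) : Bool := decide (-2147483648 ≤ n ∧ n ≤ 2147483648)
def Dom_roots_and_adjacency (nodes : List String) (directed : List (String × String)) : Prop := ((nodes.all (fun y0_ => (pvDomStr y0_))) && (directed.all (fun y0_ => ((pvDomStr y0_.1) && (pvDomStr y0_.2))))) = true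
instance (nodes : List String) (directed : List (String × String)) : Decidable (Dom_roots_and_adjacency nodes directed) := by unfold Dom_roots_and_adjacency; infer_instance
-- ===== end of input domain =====

-- B replaces A's incrementally mutated out_adj/in_deg dicts with staged comprehensions
-- (filter the edges once, build each node's successor set by a per-node comprehension,
-- roots = nodes minus the edge targets) — objective: simpler.

-- ===== PORT A =====
def roots_and_adjacency (nodes : List String) (directed : List (String × String)) : List String × (List (String × List String)) :=
  let out_adj : PySem.Dict String (PySem.Set String) :=
    nodes.foldl (fun d n => d.insert n PySem.Set.empty) PySem.Dict.empty
  let in_deg : PySem.Dict String Int :=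
    nodes.foldl (fun d n => d.insert n 0) PySem.Dict.empty
  let st := directed.foldl (fun st ab =>
      if !(st.1.contains ab.1) || !(st.1.contains ab.2) then st
      else (st.1.modify ab.1 PySem.Set.empty (fun s => PySem.Set.add s ab.2),
            st.2.modify ab.2 0 (fun c => c + 1))) (out_adj, in_deg)
  (PySem.List.sorted (nodes.filter (fun n => st.2.getD n 0 == 0)) (fun x => x) false,
   st.1.items)

-- ===== PORT B =====
def roots_and_adjacency_alt (nodes : List String) (directed : List (String × String)) : List String × (List (String × List String)) :=
  let ns : PySem.Set String := PySem.Set.ofList nodes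
  let edges : List (String × String) :=
    directed.filter (fun ab => PySem.Set.contains ns ab.1 && PySem.Set.contains ns ab.2)
  let out_adj : List (String × List String) :=
    nodes.map (fun n => (n, PySem.Set.ofList ((edges.filter (fun ab => ab.1 == n)).map Prod.snd)))
  let targets : PySem.Set String := PySem.Set.ofList (edges.map Prod.snd)
  (PySem.List.sorted (PySem.Set.diff ns targets) (fun x => x) false, out_adj)

-- ===== PRECONDITION & SPEC =====
-- Pre_ only states the type convention: the Python parameter 'nodes' is a set, so its
-- List representation holds distinct elements; it excludes no genuine set input.
def Pre_roots_and_adjacency (nodes : List String) (directed : List (String × String)) : Prop := nodes.Nodup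
instance (nodes : List String) (directed : List (String × String)) : Decidable (Pre_roots_and_adjacency nodes directed) := by unfold Pre_roots_and_adjacency; infer_instance

def pvWitness_roots_and_adjacency : List String × (List (String × String)) :=
  (["a", "b", "c"], [("a", "b"), ("b", "c"), ("a", "x")])

def Spec_roots_and_adjacency (nodes : List String) (directed : List (String × String)) (out : List String × (List (String × List String))) : Prop := out = roots_and_adjacency_alt nodes directed
instance (nodes : List String) (directed : List (String × String)) (out : List String × (List (String × List String))) : Decidable (Spec_roots_and_adjacency nodes directed out) := by unfold Spec_roots_and_adjacency; infer_instance

-- ===== CLAIM (what is proved, stated in full; the proofs are below) =====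
def Claim_equal_roots_and_adjacency : Prop := ∀ (nodes : List String) (directed : List (String × String)), Dom_roots_and_adjacency nodes directed → Pre_roots_and_adjacency nodes directed → Spec_roots_and_adjacency nodes directed (roots_and_adjacency nodes directed)

-- ===== LEMMAS AND PROOFS =====

-- the initial dicts A builds, named for the proofs
def pvInitO (nodes : List String) : PySem.Dict String (PySem.Set String) :=
  nodes.foldl (fun d n => d.insert n PySem.Set.empty) PySem.Dict.empty
def pvInitI (nodes : List String) : PySem.Dict String Int :=
  nodes.foldl (fun d n => d.insert n 0) PySem.Dict.empty
def pvGuard (nodes : List String) (ab : String × String) : Bool :=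
  (pvInitO nodes).contains ab.1 && (pvInitO nodes).contains ab.2

lemma pv_getD_foldl_insert_zero :
    ∀ (l : List String) (d : PySem.Dict String Int) (m : String),
    (∀ x, d.getD x 0 = 0) → (l.foldl (fun d n => d.insert n (0 : Int)) d).getD m 0 = 0 := by
  intro l
  induction l with
  | nil => intro d m h; exact h m
  | cons a t ih =>
      intro d m h
      refine ih _ m (fun x => ?_)
      rw [PySem.Dict.getD_insert]
      split <;> simp [h]

lemma pvInitI_getD (nodes : List String) (m : String) : (pvInitI nodes).getD m 0 = 0 := by
  exact pv_getD_foldl_insert_zero nodes PySem.Dict.empty m (fun x => by simp [pysem])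

lemma pv_getD_foldl_insert_empty :
    ∀ (l : List String) (d : PySem.Dict String (PySem.Set String)) (m : String),
    (∀ x, d.getD x PySem.Set.empty = PySem.Set.empty) →
    (l.foldl (fun d n => d.insert n PySem.Set.empty) d).getD m PySem.Set.empty = PySem.Set.empty := by
  intro l
  induction l with
  | nil => intro d m h; exact h m
  | cons a t ih =>
      intro d m h
      refine ih _ m (fun x => ?_)
      rw [PySem.Dict.getD_insert]
      split
      · rfl
      · exact h x

lemma pvInitO_getD (nodes : List String) (m : String) : (pvInitO nodes).getD m PySem.Set.empty = PySem.Set.empty := by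
  exact pv_getD_foldl_insert_empty nodes PySem.Dict.empty m (fun x => by simp [pysem])

lemma pvInitO_keys (nodes : List String) (hnd : nodes.Nodup) : (pvInitO nodes).keys = nodes := by
  unfold pvInitO
  rw [PySem.Dict.keys_foldl_insert]
  simp [PySem.Dict.keys_empty, PySem.Set.update_nil_left,
        PySem.Set.ofList_eq_self_of_nodup nodes hnd]

lemma pvInitO_contains (nodes : List String) (hnd : nodes.Nodup) (k : String) :
    (pvInitO nodes).contains k = decide (k ∈ nodes) := by
  rw [PySem.Dict.contains_eq_decide_mem_keys, pvInitO_keys nodes hnd]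

lemma pv_guard_eq (nodes : List String) (hnd : nodes.Nodup) (ab : String × String) :
    pvGuard nodes ab
      = (PySem.Set.contains (PySem.Set.ofList nodes) ab.1 &&
         PySem.Set.contains (PySem.Set.ofList nodes) ab.2) := by
  unfold pvGuard
  rw [PySem.Set.ofList_eq_self_of_nodup nodes hnd,
     pvInitO_contains nodes hnd, pvInitO_contains nodes hnd]
  simp [PySem.Set.contains_eq_listContains]

lemma pv_fold_splitA (nodes : List String) :
    ∀ (l : List (String × String)) (o : PySem.Dict String (PySem.Set String)) (i : PySem.Dict String Int),
    (∀ k, o.contains k = (pvInitO nodes).contains k) →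
    l.foldl (fun st ab =>
        if !(st.1.contains ab.1) || !(st.1.contains ab.2) then st
        else (st.1.modify ab.1 PySem.Set.empty (fun s => PySem.Set.add s ab.2),
              st.2.modify ab.2 0 (fun c => c + 1))) (o, i)
      = ((l.filter (pvGuard nodes)).foldl (fun d ab => d.modify ab.1 PySem.Set.empty (fun s => PySem.Set.add s ab.2)) o,
         (l.filter (pvGuard nodes)).foldl (fun d ab => d.modify ab.2 0 (fun c => c + 1)) i) := by
  intro l
  induction l with
  | nil => intro o i h; rfl
  | cons ab t ih =>
      intro o i h
      rw [List.foldl_cons, List.filter_cons]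
      by_cases hg : pvGuard nodes ab = true
      · have hg2 := hg
        unfold pvGuard at hg2
        have h1 : o.contains ab.1 = true := by
          rw [h ab.1]; exact ((Bool.and_eq_true _ _).mp hg2).1
        have h2 : o.contains ab.2 = true := by
          rw [h ab.2]; exact ((Bool.and_eq_true _ _).mp hg2).2
        have e1 : (!(o.contains ab.1) || !(o.contains ab.2)) = false := by
          simp [h1, h2]
        rw [e1, if_neg (by simp : ¬(false = true)), if_pos hg, List.foldl_cons, List.foldl_cons]
        refine ih _ _ ?_
        intro k
        rw [PySem.Dict.contains_modify, h k]
        by_cases hk : k = ab.1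
        · subst hk
          simp [((Bool.and_eq_true _ _).mp hg2).1]
        · simp [hk]
      · have e1 : (!(o.contains ab.1) || !(o.contains ab.2)) = true := by
          rw [h ab.1, h ab.2]
          unfold pvGuard at hg
          revert hg
          cases (pvInitO nodes).contains ab.1 <;> cases (pvInitO nodes).contains ab.2 <;> simp
        rw [e1, if_pos rfl, if_neg hg]
        exact ih o i h

lemma pv_getD_foldI (nodes : List String) (l : List (String × String)) (n : String) :
    (l.foldl (fun d ab => d.modify ab.2 0 (fun c => c + 1)) (pvInitI nodes)).getD n 0
      = ((l.map Prod.snd).count n : Int) := by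
  rw [← List.foldl_map (g := fun (d : PySem.Dict String Int) (x : String) => d.modify x 0 (fun c => c + 1)) (f := Prod.snd)]
  rw [PySem.Dict.getD_foldl_modify_add_one]
  rw [pvInitI_getD]
  ring

-- value at key c after A's adjacency loop: fold of add over the edges whose source is c
lemma pv_getD_foldO :
    ∀ (l : List (String × String)) (d : PySem.Dict String (PySem.Set String)) (c : String),
    (l.foldl (fun d ab => d.modify ab.1 PySem.Set.empty (fun s => PySem.Set.add s ab.2)) d).getD c PySem.Set.empty
      = ((l.filter (fun ab => ab.1 == c)).map Prod.snd).foldl PySem.Set.add (d.getD c PySem.Set.empty) := by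
  intro l
  induction l with
  | nil => intro d c; rfl
  | cons ab t ih =>
      intro d c
      rw [List.foldl_cons, ih, List.filter_cons]
      by_cases hc : ab.1 = c
      · subst hc
        rw [if_pos (by simp), List.map_cons, List.foldl_cons, PySem.Dict.getD_modify_self]
      · rw [if_neg (by simpa using hc), PySem.Dict.getD_modify_of_ne _ _ _ (fun h => hc h.symm)]

lemma pv_keys_foldO (nodes : List String) (hnd : nodes.Nodup) (l : List (String × String))
    (hsrc : ∀ e ∈ l, e.1 ∈ nodes) :
    (l.foldl (fun d ab => d.modify ab.1 PySem.Set.empty (fun s => PySem.Set.add s ab.2)) (pvInitO nodes)).keys = nodes := by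
  rw [PySem.Dict.keys_foldl_modify_key, pvInitO_keys nodes hnd,
      PySem.Set.update_eq_append_filter]
  have hmemn : ∀ y ∈ PySem.Set.ofList (l.map Prod.fst), y ∈ nodes := by
    intro y hy
    rcases List.mem_map.mp ((PySem.Set.mem_ofList _ _).mp hy) with ⟨e, he, rfl⟩
    exact hsrc e he
  rw [List.filter_eq_nil_iff.mpr
        (fun y hy => by simp [hmemn y hy]),
      List.append_nil]

-- ===== VERDICT (by name: the statement is the Claim_ definition above) =====
theorem roots_and_adjacency_spec : Claim_equal_roots_and_adjacency := by
  intro nodes directed _ hpre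
  have hnd : nodes.Nodup := hpre
  simp only [Spec_roots_and_adjacency, roots_and_adjacency, roots_and_adjacency_alt]
  rw [show List.foldl (fun d n => d.insert n PySem.Set.empty) PySem.Dict.empty nodes = pvInitO nodes from rfl,
      show List.foldl (fun d n => d.insert n (0 : Int)) PySem.Dict.empty nodes = pvInitI nodes from rfl]
  rw [pv_fold_splitA nodes directed _ _ (fun _ => rfl)]
  -- B's filtered edge list is the pvGuard-filtered one
  have hedges : directed.filter (fun ab => PySem.Set.contains (PySem.Set.ofList nodes) ab.1 &&
        PySem.Set.contains (PySem.Set.ofList nodes) ab.2) = directed.filter (pvGuard nodes) := by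
    exact List.filter_congr (fun ab _ => (pv_guard_eq nodes hnd ab).symm)
  rw [hedges]
  set F := List.filter (pvGuard nodes) directed with hF
  have hsrc : ∀ e ∈ F, e.1 ∈ nodes := by
    intro e he
    have hg := List.of_mem_filter he
    unfold pvGuard at hg
    have := ((Bool.and_eq_true _ _).mp hg).1
    rw [pvInitO_contains nodes hnd] at this
    exact of_decide_eq_true this
  refine congrArg₂ Prod.mk ?_ ?_
  · -- roots
    refine congrArg (fun l => PySem.List.sorted l (fun x => x) false) ?_
    rw [PySem.Set.ofList_eq_self_of_nodup nodes hnd]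
    show List.filter _ nodes = PySem.Set.diff nodes (PySem.Set.ofList (F.map Prod.snd))
    unfold PySem.Set.diff
    refine List.filter_congr ?_
    intro n _
    rw [pv_getD_foldI]
    by_cases hmem : n ∈ F.map Prod.snd
    · have hc : PySem.Set.contains (PySem.Set.ofList (F.map Prod.snd)) n = true :=
        (PySem.Set.contains_iff _ _).mpr ((PySem.Set.mem_ofList _ _).mpr hmem)
      have hcz : List.count n (F.map Prod.snd) ≠ 0 := by
        simpa [List.count_eq_zero] using hmem
      simp [hcz, PySem.Set.mem_ofList, hmem]
    · have hc : PySem.Set.contains (PySem.Set.ofList (F.map Prod.snd)) n = false := by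
        rw [Bool.eq_false_iff]
        intro h
        exact hmem ((PySem.Set.mem_ofList _ _).mp ((PySem.Set.contains_iff _ _).mp h))
      have hcz : List.count n (F.map Prod.snd) = 0 := List.count_eq_zero.mpr hmem
      simp [hcz, PySem.Set.mem_ofList, hmem]
  · -- adjacency
    set oF := F.foldl (fun d ab => d.modify ab.1 PySem.Set.empty (fun s => PySem.Set.add s ab.2)) (pvInitO nodes) with hoF
    have hkeys : oF.keys = nodes := pv_keys_foldO nodes hnd F hsrc
    have hndk : oF.keys.Nodup := hkeys ▸ hnd
    rw [PySem.Dict.items_eq_map_keys oF hndk PySem.Set.empty, hkeys]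
    refine List.map_congr_left ?_
    intro n _
    refine congrArg (fun s => (n, s)) ?_
    rw [hoF, pv_getD_foldO, pvInitO_getD, PySem.Set.ofList_eq_foldl]
    rfl
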